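-- pv_equiv track=rewrite | github.com/Lkeurentjes/Advent_of_code | 2025/2025-02-GiftShop/2025-02-GiftShop.py | checknumberrepeat
-- ===== SOURCE A (Python) =====
-- def checknumberrepeat(number):
--     s = str(number)
--     length = len(s)
--     for k in range(1, length // 2 + 1):
--         if length % k == 0:
--             if s == s[:k] * (length // k):
--                 return number
--     return 0
-- ===== SOURCE B (Python) =====
-- def checknumberrepeat(number):
--     s = str(number)
--     return number if s in (s + s)[1:-1] else 0
-- ===== Notes on version B (the rewrite author's own statement) =====
-- stated objective: idiomatic
-- what changed: Replaced the loop over divisors k (building s[:k]*(length//k) for each) with the classic self-concatenation periodicity idiom: s is a repetition of a smaller block iff s occurs in (s+s)[1:-1], tested by one substring search.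
import Mathlib
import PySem

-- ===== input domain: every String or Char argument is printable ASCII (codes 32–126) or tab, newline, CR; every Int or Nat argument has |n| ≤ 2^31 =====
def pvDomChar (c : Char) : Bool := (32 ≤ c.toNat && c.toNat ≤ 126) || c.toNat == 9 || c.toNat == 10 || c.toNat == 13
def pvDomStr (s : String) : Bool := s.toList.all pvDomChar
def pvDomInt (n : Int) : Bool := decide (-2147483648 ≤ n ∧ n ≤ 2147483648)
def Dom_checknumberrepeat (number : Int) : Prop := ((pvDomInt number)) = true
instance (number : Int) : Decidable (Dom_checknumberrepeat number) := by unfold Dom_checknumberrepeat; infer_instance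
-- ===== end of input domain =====

-- B replaces A's loop over divisors k (comparing s against s[:k]*(length//k)) by the
-- self-concatenation idiom: s is a repetition of a smaller block iff s occurs in (s+s)[1:-1].

-- ===== PORT A =====
-- s[:k] * (length // k): Python string repetition, ported by hand (exact: concatenation of length//k copies)
def pvBlock (s : List Char) (k : Nat) (length : Nat) : List Char :=
  (List.replicate (length / k) (s.take k)).flatten

-- the 'for k in range(1, length // 2 + 1)' loop with its early return
def pvLoopA (number : Int) (s : List Char) (length : Nat) : List Nat → Int
  | [] => 0
  | k :: ks =>
      if length % k = 0 then
        if s = pvBlock s k length then number else pvLoopA number s length ks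
      else pvLoopA number s length ks

def checknumberrepeat (number : Int) : Int :=
  let s := PySem.Int.toChars number
  let length := s.length
  pvLoopA number s length (List.range' 1 (length / 2))

-- ===== PORT B =====
def checknumberrepeat_alt (number : Int) : Int :=
  let s := PySem.Int.toChars number
  if PySem.Chars.isIn s (PySem.List.slice (s ++ s) (some 1) (some (-1))) then number else 0

-- ===== PRECONDITION & SPEC =====
def Spec_checknumberrepeat (number : Int) (out : Int) : Prop := out = checknumberrepeat_alt number
instance (number : Int) (out : Int) : Decidable (Spec_checknumberrepeat number out) := by unfold Spec_checknumberrepeat; infer_instance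

-- ===== CLAIM (what is proved, stated in full; the proofs are below) =====
def Claim_equal_checknumberrepeat : Prop := ∀ (number : Int), Dom_checknumberrepeat number → Spec_checknumberrepeat number (checknumberrepeat number)

-- ===== LEMMAS AND PROOFS =====

-- A's loop returns `number` iff some k in the list of candidates passes its two tests, else 0
theorem pvLoopA_eq (number : Int) (s : List Char) (length : Nat) (ks : List Nat) :
    pvLoopA number s length ks =
      if ∃ k ∈ ks, length % k = 0 ∧ s = pvBlock s k length then number else 0 := by
  induction ks with
  | nil => simp [pvLoopA]
  | cons k ks ih =>
    by_cases h1 : length % k = 0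
    · by_cases h2 : s = pvBlock s k length
      · have hex : ∃ k' ∈ k :: ks, length % k' = 0 ∧ s = pvBlock s k' length :=
          ⟨k, by simp, h1, h2⟩
        simp only [pvLoopA, if_pos h1, if_pos h2, if_pos hex]
      · simp [pvLoopA, h1, h2, ih]
    · simp [pvLoopA, h1, ih]

theorem toChars_core_len (b : Nat) : ∀ (f n : Nat) (l : List Char),
    l.length ≤ (Nat.toDigitsCore b f n l).length := by
  intro f
  induction f with
  | zero => intro n l; simp [Nat.toDigitsCore]
  | succ f ih =>
    intro n l
    simp only [Nat.toDigitsCore]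
    split
    · simp
    · exact le_trans (by simp) (ih _ _)

theorem toChars_core_ne_nil (b : Nat) (f n : Nat) (l : List Char) (hf : 0 < f) :
    Nat.toDigitsCore b f n l ≠ [] := by
  rcases f with _ | f
  · omega
  · simp only [Nat.toDigitsCore]
    split
    · simp
    · intro h
      have h2 := toChars_core_len b f (n / b) (Nat.digitChar (n % b) :: l)
      rw [h] at h2
      simp at h2

-- str(number) is never the empty string
theorem toChars_ne_nil (m : Int) : PySem.Int.toChars m ≠ [] := by
  unfold PySem.Int.toChars
  split
  · simp
  · exact toChars_core_ne_nil 10 (m.toNat + 1) m.toNat [] (by omega)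

-- xs[1:-1] is tail + dropLast
theorem slice_one_neg_one {α : Type} (xs : List α) :
    PySem.List.slice xs (some 1) (some (-1)) = xs.tail.dropLast := by
  rcases xs with _ | ⟨a, l⟩
  · rfl
  · simp only [PySem.List.slice, PySem.List.clampIdx_neg_one]
    have h1 : PySem.List.clampIdx (a :: l).length 1 = 1 := by
      simp [PySem.List.clampIdx]
    rw [h1]
    simp only [List.length_cons, List.drop_one, List.tail_cons]
    rw [List.dropLast_eq_take]
    congr 1

theorem flatten_rep_add {α : Type} (t : List α) (a b : Nat) :
    (List.replicate a t).flatten ++ (List.replicate b t).flatten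
      = (List.replicate (a + b) t).flatten := by
  rw [List.replicate_add, List.flatten_append]

theorem flatten_rep_succ {α : Type} (t : List α) (x : Nat) :
    (List.replicate (x + 1) t).flatten = t ++ (List.replicate x t).flatten := by
  rw [List.replicate_succ, List.flatten_cons]

-- two words that commute are powers of the shorter one
theorem pow_of_commute {α : Type} :
    ∀ (m : Nat) (t r : List α), 0 < t.length → r.length = m * t.length →
      t ++ r = r ++ t → r = (List.replicate m t).flatten := by
  intro m
  induction m with
  | zero => intro t r ht hr _; simpa using List.eq_nil_of_length_eq_zero (by simpa using hr)
  | succ m ih =>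
    intro t r ht hr hc
    have hle : t.length ≤ r.length := by rw [hr]; nlinarith
    have htake : List.take t.length r = t := by
      have := congrArg (List.take t.length) hc
      rwa [List.take_append_of_le_length (le_refl _), List.take_length,
           List.take_append_of_le_length hle, eq_comm] at this
    have hdrop : r = List.drop t.length r ++ t := by
      have := congrArg (List.drop t.length) hc
      rwa [List.drop_append_of_le_length (le_refl _), List.drop_length,
           List.drop_append_of_le_length hle, List.nil_append] at this
    have hr1 : t ++ List.drop t.length r = r := by
      have h := List.take_append_drop t.length r
      rwa [htake] at h
    have hc' : t ++ List.drop t.length r = List.drop t.length r ++ t := hr1.trans hdrop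
    have hlen' : (List.drop t.length r).length = m * t.length := by
      simp [hr, Nat.succ_mul]
    have hres := ih t (List.drop t.length r) ht hlen' hc'
    calc r = t ++ List.drop t.length r := hr1.symm
      _ = t ++ (List.replicate m t).flatten := by rw [hres]
      _ = (List.replicate (m + 1) t).flatten := by rw [List.replicate_succ, List.flatten_cons]

theorem rotate_mul_of_rotate_eq {α : Type} {l : List α} {i : Nat} (h : l.rotate i = l) :
    ∀ m : Nat, l.rotate (m * i) = l := by
  intro m
  induction m with
  | zero => simp
  | succ m ih =>
    have h2 : l.rotate (m * i + i) = (l.rotate (m * i)).rotate i := by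
      rw [List.rotate_rotate]
    rw [Nat.succ_mul, h2, ih, h]

-- rotations fixing l are closed under gcd (Euclid's algorithm, no Bézout needed)
theorem rotate_gcd {α : Type} {l : List α} :
    ∀ (i j : Nat), l.rotate i = l → l.rotate j = l → l.rotate (Nat.gcd i j) = l := by
  intro i
  induction i using Nat.strong_induction_on with
  | _ i ih =>
    intro j hi hj
    rcases Nat.eq_zero_or_pos i with h0 | h0
    · subst h0; simpa using hj
    · rw [Nat.gcd_rec i j]
      have hmod : l.rotate (j % i) = l := by
        calc l.rotate (j % i) = (l.rotate (j / i * i)).rotate (j % i) := by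
              rw [rotate_mul_of_rotate_eq hi]
          _ = l.rotate (j / i * i + j % i) := by rw [List.rotate_rotate]
          _ = l.rotate j := by
              rw [show j / i * i + j % i = j from by
                rw [Nat.mul_comm]; exact Nat.div_add_mod j i]
          _ = l := hj
      exact ih (j % i) (Nat.mod_lt _ h0) i hmod hi

-- a period g dividing the length makes the word a power of its first g letters
theorem period_to_power {α : Type} {l : List α} {g : Nat} (hg : 0 < g)
    (hdvd : g ∣ l.length) (hrot : l.rotate g = l) :
    l = (List.replicate (l.length / g) (l.take g)).flatten := by
  rcases Nat.eq_zero_or_pos l.length with h0 | h0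
  · have hnil : l = [] := List.eq_nil_of_length_eq_zero h0
    subst hnil; simp
  · have hgle : g ≤ l.length := Nat.le_of_dvd h0 hdvd
    rw [List.rotate_eq_drop_append_take hgle] at hrot
    have hc : l.take g ++ l.drop g = l.drop g ++ l.take g := by
      rw [List.take_append_drop, hrot]
    have ht : 0 < (l.take g).length := by simp; omega
    have hlen : (l.drop g).length = (l.length / g - 1) * (l.take g).length := by
      obtain ⟨c, hc'⟩ := hdvd
      have h1 : (l.take g).length = g := by rw [List.length_take, Nat.min_eq_left hgle]
      have h2 : l.length / g = c := by rw [hc', Nat.mul_div_cancel_left _ hg]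
      rw [h1, List.length_drop, h2, hc', Nat.sub_mul, one_mul, Nat.mul_comm]
    have hres := pow_of_commute (l.length / g - 1) (l.take g) (l.drop g) ht hlen hc
    have hq : 0 < l.length / g := Nat.div_pos hgle hg
    obtain ⟨q, hq'⟩ : ∃ q, l.length / g = q + 1 := ⟨l.length / g - 1, by omega⟩
    have hq1 : l.length / g - 1 = q := by omega
    rw [hq1] at hres
    rw [hq', List.replicate_succ, List.flatten_cons, ← hres, List.take_append_drop]

-- forward direction: a power of a proper block occurs inside (l++l)[1:-1]
theorem power_to_infix {l : List Char} {k : Nat} (hk : 0 < k) (hkn : k ≤ l.length / 2)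
    (hdvd : l.length % k = 0) (hpow : l = pvBlock l k l.length) (hne : l ≠ []) :
    l <:+: (l ++ l).tail.dropLast := by
  obtain ⟨m, hm⟩ := Nat.dvd_of_mod_eq_zero hdvd
  have hnk : l.length / k = m := by rw [hm, Nat.mul_div_cancel_left _ hk]
  have hnpos : 0 < l.length := List.length_pos_iff.mpr hne
  have h2k : 2 * k ≤ l.length := by omega
  have hm2 : 2 ≤ m := by rcases m with _ | _ | m <;> omega
  set t := l.take k with ht
  have hlt : t.length = k := by rw [ht, List.length_take, Nat.min_eq_left (by omega)]
  have htne : t ≠ [] := by intro h; rw [h] at hlt; simp at hlt; omega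
  have hl : l = (List.replicate m t).flatten := by rw [hpow, pvBlock, hnk]
  have hb : (List.replicate (m - 1) t).flatten ≠ [] := by
    intro h
    have h' := List.flatten_eq_nil_iff.mp h
    exact htne (h' t (List.mem_replicate.mpr ⟨by omega, rfl⟩))
  have hkey : l ++ l = t ++ (l ++ (List.replicate (m - 1) t).flatten) := by
    conv_lhs => rw [hl]
    conv_rhs => rw [hl]
    rw [flatten_rep_add, flatten_rep_add, ← flatten_rep_succ]
    congr 2
    omega
  rw [hkey, List.tail_append_of_ne_nil htne, ← List.append_assoc,
      List.dropLast_append_of_ne_nil hb]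
  exact ⟨t.tail, (List.replicate (m - 1) t).flatten.dropLast, by simp⟩

-- backward direction: an occurrence inside (l++l)[1:-1] is a nontrivial rotation fixing l
theorem infix_to_rotate {l : List Char} (hne : l ≠ [])
    (h : l <:+: (l ++ l).tail.dropLast) :
    ∃ i : Nat, 0 < i ∧ i < l.length ∧ l.rotate i = l := by
  obtain ⟨pre, suf, heq⟩ := h
  have hnpos : 0 < l.length := List.length_pos_iff.mpr hne
  have hlen : pre.length + l.length + suf.length = 2 * l.length - 2 := by
    have := congrArg List.length heq
    simp [List.length_tail, List.length_dropLast] at this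
    omega
  have hp : pre.length + 2 ≤ l.length := by omega
  set n := l.length with hn
  set p := pre.length with hp'
  have h1 : ((pre ++ l ++ suf).drop p).take n = l := by
    rw [List.append_assoc, List.drop_left, List.take_left]
  rw [heq] at h1
  have htgt : (l ++ l).tail.dropLast = ((l ++ l).drop 1).take (2 * n - 2) := by
    rw [List.drop_one, List.dropLast_eq_take]
    congr 1
    simp [List.length_tail]
    omega
  rw [htgt, List.drop_take, List.take_take, List.drop_drop] at h1
  have hmin : min n (2 * n - 2 - p) = n := by omega
  rw [hmin] at h1
  refine ⟨p + 1, by omega, by omega, ?_⟩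
  rw [List.rotate_eq_drop_append_take (by omega)]
  have h2 : (l ++ l).drop (p + 1) = l.drop (p + 1) ++ l := by
    rw [List.drop_append_of_le_length (by omega)]
  rw [show 1 + p = p + 1 from by omega, h2, List.take_append] at h1
  rw [List.take_of_length_le (by simp; omega)] at h1
  rw [show n - (l.drop (p + 1)).length = p + 1 from by simp; omega] at h1
  exact h1

-- the heart of the equivalence: A's divisor test ⟺ B's substring test
theorem key_iff (l : List Char) (hne : l ≠ []) :
    (∃ k ∈ List.range' 1 (l.length / 2), l.length % k = 0 ∧ l = pvBlock l k l.length)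
      ↔ PySem.Chars.isIn l (PySem.List.slice (l ++ l) (some 1) (some (-1))) = true := by
  rw [slice_one_neg_one, PySem.Chars.isIn_iff_infix]
  constructor
  · rintro ⟨k, hmem, hdvd, hpow⟩
    obtain ⟨i, hi, hk⟩ := List.mem_range'.mp hmem
    exact power_to_infix (by omega) (by omega) hdvd hpow hne
  · intro h
    obtain ⟨i, hi0, hin, hrot⟩ := infix_to_rotate hne h
    have hrotn : l.rotate l.length = l := List.rotate_length l
    have hg : l.rotate (Nat.gcd i l.length) = l := rotate_gcd i l.length hrot hrotn
    set g := Nat.gcd i l.length with hgdef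
    have hgpos : 0 < g := Nat.gcd_pos_of_pos_left _ hi0
    have hgdvd : g ∣ l.length := Nat.gcd_dvd_right _ _
    have hgi : g ≤ i := Nat.le_of_dvd hi0 (Nat.gcd_dvd_left _ _)
    have hghalf : g ≤ l.length / 2 := by
      obtain ⟨c, hc⟩ := hgdvd
      have hc2 : 2 ≤ c := by rcases c with _ | _ | c <;> omega
      have : g * 2 ≤ g * c := Nat.mul_le_mul_left g hc2
      omega
    refine ⟨g, List.mem_range'.mpr ⟨g - 1, by omega, by omega⟩,
      Nat.mod_eq_zero_of_dvd hgdvd, ?_⟩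
    exact period_to_power hgpos hgdvd hg

-- ===== VERDICT (by name: the statement is the Claim_ definition above) =====
theorem checknumberrepeat_spec : Claim_equal_checknumberrepeat := by
  intro number _
  unfold Spec_checknumberrepeat checknumberrepeat checknumberrepeat_alt
  simp only [pvLoopA_eq]
  have hk := key_iff (PySem.Int.toChars number) (toChars_ne_nil number)
  split_ifs with h1 h2 h2 <;> first | rfl | exact absurd (hk.mp h1) h2 | exact absurd (hk.mpr h2) h1
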